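-- pv_equiv track=rewrite | github.com/volcengine/verl | atropos/environments/intern_bootcamp/internbootcamp_lib/internbootcamp/bootcamp/btheworldisjustaprogrammingtaskhardversion/btheworldisjustaprogrammingtaskhardversion.py | compute_min_balance_and_count
-- ===== SOURCE A (Python) =====
-- def compute_min_balance_and_count(s):
--     balance = 0
--     min_balance = 0
--     count = 0
--     prefix = []
--     for c in s:
--         balance += 1 if c == '(' else -1
--         prefix.append(balance)
--         if balance < min_balance:
--             min_balance = balance
--             count = 1
--         elif balance == min_balance:
--             count += 1
--     return min_balance, count, prefix
-- ===== SOURCE B (Python) =====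
-- def compute_min_balance_and_count(s):
--     prefix = []
--     total = 0
--     for c in s:
--         total += 1 if c == '(' else -1
--         prefix.append(total)
--     min_balance = min([0] + prefix)
--     return min_balance, prefix.count(min_balance), prefix
-- ===== Notes on version B (the rewrite author's own statement) =====
-- stated objective: simpler
-- what changed: Replaces the single loop's reset-on-new-minimum counter logic by: one accumulation pass building the prefix array, then min([0]+prefix) and prefix.count(min_balance) over the built array.
import Mathlib
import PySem

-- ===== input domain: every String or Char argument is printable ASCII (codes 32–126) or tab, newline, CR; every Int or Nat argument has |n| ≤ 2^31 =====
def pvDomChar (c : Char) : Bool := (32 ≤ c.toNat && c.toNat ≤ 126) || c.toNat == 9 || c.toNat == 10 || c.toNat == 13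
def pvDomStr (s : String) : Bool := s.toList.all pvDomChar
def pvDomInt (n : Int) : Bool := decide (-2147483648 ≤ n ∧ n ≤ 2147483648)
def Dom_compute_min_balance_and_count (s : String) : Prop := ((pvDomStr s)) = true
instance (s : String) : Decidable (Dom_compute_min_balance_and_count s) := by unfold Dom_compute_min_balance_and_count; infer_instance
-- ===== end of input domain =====

-- B builds the pfx array in one accumulation pass, then takes min([0]+pfx) and counts
-- its occurrences with list.count, instead of A's in-loop reset-on-new-minimum counter. Objective: simpler.

-- ===== PORT A =====
-- A's single loop with state (balance, min_balance, count, pfx)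
def pvGoA : List Char → Int → Int → Int → List Int → Int × Int × List Int
  | [], _, min_balance, count, pfx => (min_balance, count, pfx)
  | c :: rest, balance, min_balance, count, pfx =>
    let balance := balance + (if c = '(' then 1 else -1)
    let pfx := pfx ++ [balance]
    if balance < min_balance then
      pvGoA rest balance balance 1 pfx
    else if balance = min_balance then
      pvGoA rest balance min_balance (count + 1) pfx
    else
      pvGoA rest balance min_balance count pfx

def compute_min_balance_and_count (s : String) : Int × Int × List Int :=
  pvGoA s.toList 0 0 0 []

-- ===== PORT B =====
-- accumulation pass: running totals of +1/-1
def pvScanB : List Char → Int → List Int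
  | [], _ => []
  | c :: rest, total =>
    let total := total + (if c = '(' then 1 else -1)
    total :: pvScanB rest total

def compute_min_balance_and_count_alt (s : String) : Int × Int × List Int :=
  let pfx := pvScanB s.toList 0
  -- min([0] + prefix): the list is nonempty, so min? is some; getD's default is never used
  let min_balance := (PySem.List.min? ((0 : Int) :: pfx) (fun x => x)).getD 0
  (min_balance, PySem.List.count pfx min_balance, pfx)

-- ===== PRECONDITION & SPEC =====
def Spec_compute_min_balance_and_count (s : String) (out : Int × Int × List Int) : Prop := out = compute_min_balance_and_count_alt s
instance (s : String) (out : Int × Int × List Int) : Decidable (Spec_compute_min_balance_and_count s out) := by unfold Spec_compute_min_balance_and_count; infer_instance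

-- ===== CLAIM (what is proved, stated in full; the proofs are below) =====
def Claim_equal_compute_min_balance_and_count : Prop := ∀ (s : String), Dom_compute_min_balance_and_count s → Spec_compute_min_balance_and_count s (compute_min_balance_and_count s)

-- ===== LEMMAS AND PROOFS =====

-- Main invariant: if m bounds everything seen so far (the baseline 0 and every element of p)
-- and c counts m's occurrences in p, then A's loop from (b, m, c, p) returns the overall
-- minimum, its occurrence count in the full pfx list, and that list.
theorem pvGoA_invariant (cs : List Char) : ∀ (b m c : Int) (p : List Int),
    (∀ x ∈ p, m ≤ x) → m ≤ 0 → c = (p.count m : Int) →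
    pvGoA cs b m c p =
      ((pvScanB cs b).foldl min m,
       ((p ++ pvScanB cs b).count ((pvScanB cs b).foldl min m) : Int),
       p ++ pvScanB cs b) := by
  induction cs with
  | nil => intro b m c p hub hm hc; simp [pvGoA, pvScanB, hc]
  | cons ch rest ih =>
    intro b m c p hub hm hc
    simp only [pvGoA, pvScanB]
    set b' := b + (if ch = '(' then 1 else -1) with hb'
    by_cases h1 : b' < m
    · simp only [if_pos h1]
      rw [ih b' b' 1 (p ++ [b'])
        (by intro x hx; rcases List.mem_append.1 hx with hx | hx
            · exact le_of_lt (lt_of_lt_of_le h1 (hub x hx))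
            · simp at hx; omega)
        (by omega)
        (by rw [List.count_append]
            have : p.count b' = 0 := by
              rw [List.count_eq_zero]
              intro hmem
              exact absurd (hub b' hmem) (by omega)
            simp [this])]
      have hmin : min m b' = b' := by omega
      simp [hmin, List.append_assoc]
    · simp only [if_neg h1]
      by_cases h2 : b' = m
      · simp only [if_pos h2]
        rw [ih b' m (c + 1) (p ++ [b'])
          (by intro x hx; rcases List.mem_append.1 hx with hx | hx
              · exact hub x hx
              · simp at hx; omega)
          hm
          (by rw [List.count_append, hc]; simp [h2])]
        have hmin : min m b' = m := by omega
        simp [hmin, List.append_assoc]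
      · simp only [if_neg h2]
        rw [ih b' m c (p ++ [b'])
          (by intro x hx; rcases List.mem_append.1 hx with hx | hx
              · exact hub x hx
              · simp at hx; omega)
          hm
          (by rw [List.count_append, hc]
              have : ([b'] : List Int).count m = 0 := by
                simp [List.count_singleton]; omega
              simp [this])]
        have hmin : min m b' = m := by omega
        simp [hmin, List.append_assoc]

-- ===== VERDICT (by name: the statement is the Claim_ definition above) =====
theorem compute_min_balance_and_count_spec : Claim_equal_compute_min_balance_and_count := by
  intro s _
  unfold Spec_compute_min_balance_and_count compute_min_balance_and_count compute_min_balance_and_count_alt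
  rw [pvGoA_invariant s.toList 0 0 0 [] (by simp) (by omega) (by simp)]
  show _ = (_, _, _)
  rw [PySem.List.min?_id_cons]
  simp [PySem.List.count_eq]
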